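-- pv_equiv track=rewrite | github.com/taylor-boyd/Web-Scraping-Proj | selenium_test.py | month_reformat
-- ===== SOURCE A (Python) =====
-- def month_reformat(exp_date):
--     months = ['Jan','Feb','Mar','Apr','May','Jun','Jul','Aug','Sep','Oct','Nov','Dec']
--     index = 1
--     for m in months:
--         if m in exp_date:
--             exp_date = exp_date.replace(m,str(index))
--         index += 1
--     return exp_date
-- ===== SOURCE B (Python) =====
-- def month_reformat(exp_date):
--     months = {'Jan': '1', 'Feb': '2', 'Mar': '3', 'Apr': '4', 'May': '5', 'Jun': '6',
--               'Jul': '7', 'Aug': '8', 'Sep': '9', 'Oct': '10', 'Nov': '11', 'Dec': '12'}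
--     out = []
--     i = 0
--     n = len(exp_date)
--     while i < n:
--         chunk = exp_date[i:i+3]
--         if chunk in months:
--             out.append(months[chunk])
--             i += 3
--         else:
--             out.append(exp_date[i])
--             i += 1
--     return ''.join(out)
-- ===== Notes on version B (the rewrite author's own statement) =====
-- stated objective: alternative
-- what changed: Replaces A's twelve sequential full-string .replace passes by a single left-to-right scan with a month->number dict: at each position the 3-char window is looked up and either the number is emitted (skip 3) or the character is copied (trade: one pure-Python pass instead of twelve C-level scans).
import Mathlib
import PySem

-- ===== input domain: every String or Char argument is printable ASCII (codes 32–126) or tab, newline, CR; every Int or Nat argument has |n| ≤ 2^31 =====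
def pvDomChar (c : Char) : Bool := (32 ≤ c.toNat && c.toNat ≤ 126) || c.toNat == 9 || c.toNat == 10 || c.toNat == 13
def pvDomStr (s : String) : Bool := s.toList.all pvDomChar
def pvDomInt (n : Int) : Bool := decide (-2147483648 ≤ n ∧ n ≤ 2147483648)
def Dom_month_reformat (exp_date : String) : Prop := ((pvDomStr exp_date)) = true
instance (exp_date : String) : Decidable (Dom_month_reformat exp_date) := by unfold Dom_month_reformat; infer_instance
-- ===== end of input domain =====

-- B replaces A's twelve sequential .replace passes by one left-to-right scan with a
-- month->number dict (objective: alternative single-pass algorithm, same results).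

-- ===== PORT A =====
-- A: for m in months: if m in exp_date: exp_date = exp_date.replace(m, str(index)); index += 1
def month_reformat (exp_date : String) : String :=
  ((["Jan","Feb","Mar","Apr","May","Jun","Jul","Aug","Sep","Oct","Nov","Dec"].foldl
      (fun (st : String × Int) m =>
        ((if PySem.Str.isIn m st.1 then PySem.Str.replace st.1 m (PySem.Int.toStr st.2) else st.1),
         st.2 + 1))
      (exp_date, 1)).1)

-- ===== PORT B =====
-- B's dict literal months = {'Jan': '1', ..., 'Dec': '12'} (String ops are ported on List Char)
def pvMonthsItems : List (List Char × List Char) :=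
  [("Jan".toList, "1".toList), ("Feb".toList, "2".toList), ("Mar".toList, "3".toList),
   ("Apr".toList, "4".toList), ("May".toList, "5".toList), ("Jun".toList, "6".toList),
   ("Jul".toList, "7".toList), ("Aug".toList, "8".toList), ("Sep".toList, "9".toList),
   ("Oct".toList, "10".toList), ("Nov".toList, "11".toList), ("Dec".toList, "12".toList)]

def pvMonths : PySem.Dict (List Char) (List Char) := PySem.Dict.mk pvMonthsItems

-- B's while loop: chunk = exp_date[i:i+3]; emit months[chunk] and skip 3, else copy one char
def pvScan (cs : List Char) : List Char :=
  match cs with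
  | [] => []
  | c :: t =>
    match pvMonths.get? (List.take 3 (c :: t)) with
    | some r => r ++ pvScan (List.drop 2 t)
    | none => c :: pvScan t
termination_by cs.length
decreasing_by
  · simp
  · simp

def month_reformat_alt (exp_date : String) : String :=
  String.ofList (pvScan exp_date.toList)

-- ===== PRECONDITION & SPEC =====
def Spec_month_reformat (exp_date : String) (out : String) : Prop := out = month_reformat_alt exp_date
instance (exp_date : String) (out : String) : Decidable (Spec_month_reformat exp_date out) := by unfold Spec_month_reformat; infer_instance

-- ===== CLAIM (what is proved, stated in full; the proofs are below) =====
def Claim_equal_month_reformat : Prop := ∀ (exp_date : String), Dom_month_reformat exp_date → Spec_month_reformat exp_date (month_reformat exp_date)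

-- ===== LEMMAS AND PROOFS =====

/-- Python's str.replace for a nonempty pattern, as a direct recursion on the list. -/
def pvRepl (old new : List Char) : List Char → List Char
  | [] => []
  | c :: t =>
    if old <+: (c :: t) then new ++ pvRepl old new (t.drop (old.length - 1))
    else c :: pvRepl old new t
termination_by l => l.length
decreasing_by
  · simp
  · simp

lemma pvRepl_nil (old new : List Char) : pvRepl old new [] = [] := by simp [pvRepl]

lemma pvRepl_cons_pos (old new : List Char) (c : Char) (t : List Char)
    (h : old <+: (c :: t)) :
    pvRepl old new (c :: t) = new ++ pvRepl old new (t.drop (old.length - 1)) := by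
  simp only [pvRepl]
  rw [if_pos h]

lemma pvRepl_cons_neg (old new : List Char) (c : Char) (t : List Char)
    (h : ¬ old <+: (c :: t)) :
    pvRepl old new (c :: t) = c :: pvRepl old new t := by
  simp only [pvRepl]
  rw [if_neg h]

lemma pvGo_eq (old new : List Char) (hold : old ≠ []) :
    ∀ (fuel : Nat) (l acc : List Char), l.length ≤ fuel →
      PySem.Chars.replace.go old new fuel l acc = acc.reverse ++ pvRepl old new l := by
  intro fuel
  induction fuel with
  | zero =>
    intro l acc h
    have hl : l = [] := by cases l <;> simp_all
    subst hl
    simp [PySem.Chars.replace.go, pvRepl_nil]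
  | succ n ih =>
    intro l acc h
    cases l with
    | nil => simp [PySem.Chars.replace.go, pvRepl_nil]
    | cons c t =>
      by_cases hp : old <+: (c :: t)
      · obtain ⟨x, o', rfl⟩ : ∃ x o', old = x :: o' := by
          cases old with
          | nil => exact absurd rfl hold
          | cons x o' => exact ⟨x, o', rfl⟩
        have hb : (x :: o').isPrefixOf (c :: t) = true := List.isPrefixOf_iff_prefix.mpr hp
        have hlen : (List.drop (x :: o').length (c :: t)).length ≤ n := by
          simp at h ⊢; omega
        simp only [PySem.Chars.replace.go]
        rw [if_pos hb, ih _ _ hlen, pvRepl_cons_pos _ _ _ _ hp]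
        simp [List.drop_succ_cons]
      · have hb : ¬ old.isPrefixOf (c :: t) = true := fun hb =>
          hp (List.isPrefixOf_iff_prefix.mp hb)
        have hlen : t.length ≤ n := by simp at h; omega
        simp only [PySem.Chars.replace.go]
        rw [if_neg hb, ih _ _ hlen, pvRepl_cons_neg _ _ _ _ hp]
        simp

lemma pvReplace_eq (old new s : List Char) (hold : old ≠ []) :
    PySem.Chars.replace s old new = pvRepl old new s := by
  rw [PySem.Chars.replace]
  have hne : old.isEmpty = false := by simp [hold]
  rw [hne]
  simpa using pvGo_eq old new hold s.length s [] le_rfl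

lemma pvRepl_not_infix (old new : List Char) (l : List Char) (h : ¬ old <:+: l) :
    pvRepl old new l = l := by
  induction l with
  | nil => exact pvRepl_nil old new
  | cons c t ih =>
    have hp : ¬ old <+: (c :: t) := fun hb => h hb.isInfix
    rw [pvRepl_cons_neg _ _ _ _ hp, ih (fun hi => h (List.infix_cons hi))]

lemma pvRepl_block (x y z a b c : Char) (new v : List Char)
    (hne : ([x, y, z] : List Char) ≠ [a, b, c]) (hxb : x ≠ b) (hxc : x ≠ c) :
    pvRepl [x, y, z] new (a :: b :: c :: v) = a :: b :: c :: pvRepl [x, y, z] new v := by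
  have h0 : ¬ ([x, y, z] : List Char) <+: (a :: b :: c :: v) := by
    intro h
    obtain ⟨e1, h⟩ := List.cons_prefix_cons.mp h
    obtain ⟨e2, h⟩ := List.cons_prefix_cons.mp h
    obtain ⟨e3, _⟩ := List.cons_prefix_cons.mp h
    exact hne (by rw [e1, e2, e3])
  have h1 : ¬ ([x, y, z] : List Char) <+: (b :: c :: v) := by
    intro h
    exact hxb (List.cons_prefix_cons.mp h).1
  have h2 : ¬ ([x, y, z] : List Char) <+: (c :: v) := by
    intro h
    exact hxc (List.cons_prefix_cons.mp h).1
  rw [pvRepl_cons_neg _ _ _ _ h0, pvRepl_cons_neg _ _ _ _ h1, pvRepl_cons_neg _ _ _ _ h2]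

lemma pvRepl_self_prefix (x y z : Char) (new v : List Char) :
    pvRepl [x, y, z] new (x :: y :: z :: v) = new ++ pvRepl [x, y, z] new v := by
  rw [pvRepl_cons_pos _ _ _ _ ⟨v, rfl⟩]
  simp

lemma pvRepl_digits (x : Char) (o' new : List Char) (hx : x.isDigit = false) :
    ∀ (ds w : List Char), (∀ d ∈ ds, d.isDigit = true) →
      pvRepl (x :: o') new (ds ++ w) = ds ++ pvRepl (x :: o') new w := by
  intro ds
  induction ds with
  | nil => intro w _; simp
  | cons d ds' ih =>
    intro w hds
    have hxd : x ≠ d := by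
      intro hEq; rw [hEq, hds d (by simp)] at hx; cases hx
    have hp : ¬ (x :: o') <+: (d :: (ds' ++ w)) := by
      intro h
      exact hxd (List.cons_prefix_cons.mp h).1
    rw [List.cons_append, pvRepl_cons_neg _ _ _ _ hp,
      ih w (fun d hd => hds d (by simp [hd])), List.cons_append]

lemma pvRepl_back (x y z n0 : Char) (o' n' w : List Char)
    (hn0 : n0.isDigit = true) (hy : y.isDigit = false) (hz : z.isDigit = false)
    (h : [y, z] <+: pvRepl (x :: o') (n0 :: n') w) : [y, z] <+: w := by
  cases w with
  | nil => rw [pvRepl_nil] at h; exact absurd (List.prefix_nil.mp h) (by simp)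
  | cons c t =>
    by_cases hp : (x :: o') <+: (c :: t)
    · rw [pvRepl_cons_pos _ _ _ _ hp] at h
      have hyn : y = n0 := (List.cons_prefix_cons.mp h).1
      rw [hyn, hn0] at hy; cases hy
    · rw [pvRepl_cons_neg _ _ _ _ hp] at h
      obtain ⟨rfl, h2⟩ := List.cons_prefix_cons.mp h
      cases t with
      | nil => rw [pvRepl_nil] at h2; exact absurd (List.prefix_nil.mp h2) (by simp)
      | cons c' t' =>
        by_cases hq : (x :: o') <+: (c' :: t')
        · rw [pvRepl_cons_pos _ _ _ _ hq] at h2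
          have hzn : z = n0 := (List.cons_prefix_cons.mp h2).1
          rw [hzn, hn0] at hz; cases hz
        · rw [pvRepl_cons_neg _ _ _ _ hq] at h2
          obtain ⟨rfl, _⟩ := List.cons_prefix_cons.mp h2
          exact List.cons_prefix_cons.mpr ⟨rfl, List.cons_prefix_cons.mpr ⟨rfl, List.nil_prefix⟩⟩

/-- One sequential pass of Python replaces, list-side. -/
def pvSeq (L : List (List Char × List Char)) (cs : List Char) : List Char :=
  L.foldl (fun s p => pvRepl p.1 p.2 s) cs

/-- Shape facts about a month table: length-3 digit-free patterns, nonempty all-digit replacements. -/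
def pvGood (L : List (List Char × List Char)) : Prop :=
  ∀ p ∈ L, (p.1.length = 3 ∧ ∀ ch ∈ p.1, ch.isDigit = false) ∧
           (p.2 ≠ [] ∧ ∀ d ∈ p.2, d.isDigit = true)

lemma pvShape3 (l : List Char) (h : l.length = 3) : ∃ x y z, l = [x, y, z] := by
  cases l with
  | nil => simp at h
  | cons x l1 =>
    cases l1 with
    | nil => simp at h
    | cons y l2 =>
      cases l2 with
      | nil => simp at h
      | cons z l3 =>
        cases l3 with
        | nil => exact ⟨x, y, z, rfl⟩
        | cons w l4 => simp at h

lemma pvSeq_nil (L : List (List Char × List Char)) : pvSeq L [] = [] := by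
  induction L with
  | nil => rfl
  | cons p L' ih => simp only [pvSeq, List.foldl_cons, pvRepl_nil]; exact ih

lemma pvSeq_cons_pair (p : List Char × List Char) (L : List (List Char × List Char)) (cs : List Char) :
    pvSeq (p :: L) cs = pvSeq L (pvRepl p.1 p.2 cs) := rfl

lemma pvSeq_append (L1 L2 : List (List Char × List Char)) (cs : List Char) :
    pvSeq (L1 ++ L2) cs = pvSeq L2 (pvSeq L1 cs) := by
  simp [pvSeq, List.foldl_append]

lemma pvSeq_pass (a b c : Char) :
    ∀ (L : List (List Char × List Char)) (u : List Char), pvGood L →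
      (∀ p ∈ L, p.1[0]? ≠ some b ∧ p.1[0]? ≠ some c) →
      (∀ p ∈ L, p.1 ≠ [a, b, c]) →
      pvSeq L (a :: b :: c :: u) = a :: b :: c :: pvSeq L u := by
  intro L
  induction L with
  | nil => intro u _ _ _; rfl
  | cons p L' ih =>
    intro u hG hcr hne
    obtain ⟨⟨hlen, _⟩, _⟩ := hG p (by simp)
    obtain ⟨x, y, z, hxyz⟩ := pvShape3 p.1 hlen
    rw [pvSeq_cons_pair, pvSeq_cons_pair]
    have hxb : x ≠ b := by
      intro hq; apply (hcr p (by simp)).1; rw [hxyz, hq]; rfl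
    have hxc : x ≠ c := by
      intro hq; apply (hcr p (by simp)).2; rw [hxyz, hq]; rfl
    rw [hxyz, pvRepl_block x y z a b c _ _ (hxyz ▸ hne p (by simp)) hxb hxc]
    exact ih _ (fun q hq => hG q (by simp [hq])) (fun q hq => hcr q (by simp [hq]))
      (fun q hq => hne q (by simp [hq]))

lemma pvSeq_digits :
    ∀ (L : List (List Char × List Char)) (ds u : List Char), pvGood L →
      (∀ d ∈ ds, d.isDigit = true) →
      pvSeq L (ds ++ u) = ds ++ pvSeq L u := by
  intro L
  induction L with
  | nil => intro ds u _ _; rfl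
  | cons p L' ih =>
    intro ds u hG hds
    obtain ⟨⟨hlen, hnd⟩, _⟩ := hG p (by simp)
    obtain ⟨x, y, z, hxyz⟩ := pvShape3 p.1 hlen
    have hx : x.isDigit = false := hnd x (by rw [hxyz]; simp)
    rw [pvSeq_cons_pair, pvSeq_cons_pair, hxyz]
    rw [show ([x, y, z] : List Char) = x :: [y, z] from rfl]
    rw [pvRepl_digits x [y, z] p.2 hx ds u hds]
    exact ih _ _ (fun q hq => hG q (by simp [hq])) hds

lemma pvSeq_no_match (c : Char) :
    ∀ (L : List (List Char × List Char)) (t : List Char), pvGood L →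
      (∀ p ∈ L, ¬ p.1 <+: (c :: t)) →
      pvSeq L (c :: t) = c :: pvSeq L t := by
  intro L
  induction L with
  | nil => intro t _ _; rfl
  | cons p L' ih =>
    intro t hG hnp
    obtain ⟨⟨hlen, _⟩, ⟨hne2, hdig⟩⟩ := hG p (by simp)
    obtain ⟨x, y, z, hxyz⟩ := pvShape3 p.1 hlen
    obtain ⟨n0, n', hn⟩ : ∃ n0 n', p.2 = n0 :: n' := by
      cases hh : p.2 with
      | nil => exact absurd hh hne2
      | cons n0 n' => exact ⟨n0, n', rfl⟩
    have hn0 : n0.isDigit = true := hdig n0 (by rw [hn]; simp)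
    have hp : ¬ p.1 <+: (c :: t) := hnp p (by simp)
    rw [pvSeq_cons_pair, pvSeq_cons_pair, pvRepl_cons_neg _ _ _ _ hp]
    apply ih _ (fun q hq => hG q (by simp [hq]))
    intro q hq hcon
    obtain ⟨⟨hqlen, hqnd⟩, _⟩ := hG q (by simp [hq])
    obtain ⟨x', y', z', hq3⟩ := pvShape3 q.1 hqlen
    have hy' : y'.isDigit = false := hqnd y' (by rw [hq3]; simp)
    have hz' : z'.isDigit = false := hqnd z' (by rw [hq3]; simp)
    rw [hq3] at hcon
    obtain ⟨rfl, h2⟩ := List.cons_prefix_cons.mp hcon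
    rw [hxyz, hn] at h2
    have h2' : [y', z'] <+: t := pvRepl_back x y' z' n0 [y, z] n' t hn0 hy' hz' h2
    exact hnp q (by simp [hq]) (by rw [hq3]; exact List.cons_prefix_cons.mpr ⟨rfl, h2'⟩)

-- Facts about the literal month table
lemma pvGood_months : pvGood pvMonthsItems := by
  intro p hp
  fin_cases hp <;> refine ⟨⟨rfl, ?_⟩, ⟨by decide, ?_⟩⟩ <;> simp

lemma pvCross_months :
    ∀ p ∈ pvMonthsItems, ∀ q ∈ pvMonthsItems,
      q.1[0]? ≠ p.1[1]? ∧ q.1[0]? ≠ p.1[2]? := by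
  intro p hp q hq
  have h : pvMonthsItems.all
      (fun p => pvMonthsItems.all
        (fun q => (q.1[0]? != p.1[1]?) && (q.1[0]? != p.1[2]?))) = true := by decide
  have h1 := List.all_eq_true.mp (List.all_eq_true.mp h p hp) q hq
  simp only [Bool.and_eq_true, bne_iff_ne] at h1
  exact h1

lemma pvNodup_months : (pvMonthsItems.map Prod.fst).Nodup := by decide

lemma pvGet?_months : ∀ p ∈ pvMonthsItems, pvMonths.get? p.1 = some p.2 := by
  intro p hp
  fin_cases hp <;> decide

lemma pvGet?_mem (k r : List Char) (h : pvMonths.get? k = some r) : (k, r) ∈ pvMonthsItems := by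
  simp only [pvMonths, PySem.Dict.get?, Option.map_eq_some_iff] at h
  obtain ⟨p, hp, hr⟩ := h
  have hk : p.1 = k := by simpa using List.find?_some hp
  have hmem := List.mem_of_find?_eq_some hp
  rcases p with ⟨pk, pv⟩
  simp only at hk hr
  rw [← hk, ← hr]
  exact hmem

lemma pvScan_nil : pvScan [] = [] := by simp [pvScan]

lemma pvScan_cons (c : Char) (t : List Char) :
    pvScan (c :: t) =
      match pvMonths.get? (List.take 3 (c :: t)) with
      | some r => r ++ pvScan (List.drop 2 t)
      | none => c :: pvScan t := by
  rw [pvScan]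

lemma pvSeq_eq_scan : ∀ (n : Nat) (cs : List Char), cs.length ≤ n →
    pvSeq pvMonthsItems cs = pvScan cs := by
  intro n
  induction n with
  | zero =>
    intro cs h
    have hnil : cs = [] := by cases cs <;> simp_all
    subst hnil
    rw [pvSeq_nil, pvScan_nil]
  | succ n ih =>
    intro cs h
    cases cs with
    | nil => rw [pvSeq_nil, pvScan_nil]
    | cons c t =>
      cases hg : pvMonths.get? (List.take 3 (c :: t)) with
      | some r =>
        have hmem := pvGet?_mem _ _ hg
        obtain ⟨⟨hlen0, _⟩, ⟨hne2, hdig0⟩⟩ := pvGood_months _ hmem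
        have hlen : (List.take 3 (c :: t)).length = 3 := hlen0
        have hdig : ∀ d ∈ r, d.isDigit = true := hdig0
        obtain ⟨x, y, z, hxyz⟩ := pvShape3 _ hlen
        obtain ⟨u, hu⟩ := List.take_prefix 3 (c :: t)
        rw [hxyz] at hu
        have hct : c :: t = x :: y :: z :: u := hu.symm
        obtain ⟨bef, aft, hdec⟩ := List.append_of_mem hmem
        have hbef_mem : ∀ q ∈ bef, q ∈ pvMonthsItems := by
          intro q hq; rw [hdec]
          exact List.mem_append.mpr (Or.inl hq)
        have haft_mem : ∀ q ∈ aft, q ∈ pvMonthsItems := by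
          intro q hq; rw [hdec]
          exact List.mem_append.mpr (Or.inr (List.mem_cons_of_mem _ hq))
        have hGbef : pvGood bef := fun q hq => pvGood_months q (hbef_mem q hq)
        have hGaft : pvGood aft := fun q hq => pvGood_months q (haft_mem q hq)
        have hne_bef : ∀ q ∈ bef, q.1 ≠ [x, y, z] := by
          intro q hq hcon
          have hnd := pvNodup_months
          rw [hdec] at hnd
          simp only [List.map_append, List.map_cons, List.nodup_append] at hnd
          have hnotin : (List.take 3 (c :: t)) ∉ bef.map Prod.fst := by
            intro hin
            have hmem2 : List.take 3 (c :: t) ∈ (List.take 3 (c :: t)) :: aft.map Prod.fst :=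
              List.mem_cons_self ..
            exact hnd.2.2 _ hin _ hmem2 rfl
          apply hnotin
          rw [hxyz, ← hcon]
          exact List.mem_map_of_mem hq
        have hcr_bef : ∀ q ∈ bef, q.1[0]? ≠ some y ∧ q.1[0]? ≠ some z := by
          intro q hq
          constructor
          · have hc := (pvCross_months _ hmem q (hbef_mem q hq)).1
            rw [hxyz] at hc; simpa using hc
          · have hc := (pvCross_months _ hmem q (hbef_mem q hq)).2
            rw [hxyz] at hc; simpa using hc
        have hu_drop : u = List.drop 2 t := by
          have hdd : List.drop 3 (c :: t) = List.drop 2 t := by simp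
          rw [hct] at hdd; simpa using hdd
        have hulen : u.length ≤ n := by
          have hcl := congrArg List.length hct
          simp at hcl h; omega
        calc pvSeq pvMonthsItems (c :: t)
            = pvSeq (bef ++ (List.take 3 (c :: t), r) :: aft) (x :: y :: z :: u) := by
              rw [← hdec, ← hct]
          _ = pvSeq ((List.take 3 (c :: t), r) :: aft) (pvSeq bef (x :: y :: z :: u)) := by
              rw [pvSeq_append]
          _ = pvSeq ((List.take 3 (c :: t), r) :: aft) (x :: y :: z :: pvSeq bef u) := by
              rw [pvSeq_pass x y z bef u hGbef hcr_bef hne_bef]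
          _ = pvSeq aft (pvRepl [x, y, z] r (x :: y :: z :: pvSeq bef u)) := by
              rw [pvSeq_cons_pair, hxyz]
          _ = pvSeq aft (r ++ pvRepl [x, y, z] r (pvSeq bef u)) := by
              rw [pvRepl_self_prefix]
          _ = r ++ pvSeq aft (pvRepl [x, y, z] r (pvSeq bef u)) := by
              rw [pvSeq_digits aft r _ hGaft hdig]
          _ = r ++ pvSeq ((List.take 3 (c :: t), r) :: aft) (pvSeq bef u) := by
              rw [pvSeq_cons_pair, hxyz]
          _ = r ++ pvSeq pvMonthsItems u := by rw [← pvSeq_append, ← hdec]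
          _ = r ++ pvScan u := by rw [ih u hulen]
          _ = pvScan (c :: t) := by
              rw [pvScan_cons, hg, hu_drop]
      | none =>
        have hnp : ∀ p ∈ pvMonthsItems, ¬ p.1 <+: (c :: t) := by
          intro p hp hcon
          obtain ⟨⟨hlen, _⟩, _⟩ := pvGood_months p hp
          have hk : List.take 3 (c :: t) = p.1 := by
            have heq := List.prefix_iff_eq_take.mp hcon
            rw [hlen] at heq; exact heq.symm
          have hsome := pvGet?_months p hp
          rw [← hk] at hsome
          rw [hsome] at hg; cases hg
        rw [pvSeq_no_match c pvMonthsItems t pvGood_months hnp]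
        have htlen : t.length ≤ n := by simp at h; omega
        rw [ih t htlen, pvScan_cons, hg]

-- Bridge: one guarded replace of A, on the list side
lemma pvStepA (m r : String) (hm : m.toList ≠ []) (s : String) :
    (if PySem.Str.isIn m s then PySem.Str.replace s m r else s).toList
      = pvRepl m.toList r.toList s.toList := by
  by_cases h : PySem.Str.isIn m s = true
  · rw [if_pos h, PySem.Str.toList_replace, pvReplace_eq _ _ _ hm]
  · rw [if_neg h]
    have hni : ¬ m.toList <:+: s.toList := fun hi =>
      h ((PySem.Str.isIn_iff_infix m s).mpr hi)
    exact (pvRepl_not_infix _ _ _ hni).symm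

/-- The pattern/replacement pairs A's loop walks through, starting at counter i. -/
def pvPairsOf : List String → Int → List (List Char × List Char)
  | [], _ => []
  | m :: tl, i => (m.toList, (PySem.Int.toStr i).toList) :: pvPairsOf tl (i + 1)

lemma pvFoldA : ∀ (ms : List String) (i : Int) (s : String), (∀ m ∈ ms, m.toList ≠ []) →
    ((ms.foldl (fun (st : String × Int) m =>
        ((if PySem.Str.isIn m st.1 then PySem.Str.replace st.1 m (PySem.Int.toStr st.2) else st.1),
         st.2 + 1)) (s, i)).1).toList
      = pvSeq (pvPairsOf ms i) s.toList := by
  intro ms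
  induction ms with
  | nil => intro i s _; rfl
  | cons m tl ih =>
    intro i s hms
    rw [List.foldl_cons]
    show ((tl.foldl _
        ((if PySem.Str.isIn m s then PySem.Str.replace s m (PySem.Int.toStr i) else s), i + 1)).1).toList = _
    rw [ih (i + 1) _ (fun q hq => hms q (by simp [hq]))]
    rw [show pvPairsOf (m :: tl) i
        = (m.toList, (PySem.Int.toStr i).toList) :: pvPairsOf tl (i + 1) from rfl]
    rw [pvSeq_cons_pair]
    congr 1
    exact pvStepA m (PySem.Int.toStr i) (hms m (by simp)) s

lemma pvA_toList (s : String) :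
    (month_reformat s).toList = pvSeq pvMonthsItems s.toList := by
  unfold month_reformat
  rw [pvFoldA _ 1 s (by decide)]
  rw [show pvPairsOf ["Jan","Feb","Mar","Apr","May","Jun","Jul","Aug","Sep","Oct","Nov","Dec"] 1
      = pvMonthsItems from by decide]

-- ===== VERDICT (by name: the statement is the Claim_ definition above) =====
theorem month_reformat_spec : Claim_equal_month_reformat := by
  unfold Claim_equal_month_reformat Spec_month_reformat
  intro s _
  apply String.ext
  rw [pvA_toList, pvSeq_eq_scan s.toList.length s.toList le_rfl]
  unfold month_reformat_alt
  simp
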